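-- pv_equiv track=rewrite | github.com/Bayyys/Notes | mp4-code/code/viterbi_2.py | get_tw_pair
-- ===== SOURCE A (Python) =====
-- def get_tw_pair(train):
--     """
--     :param train: training data (list of sentences, with tags on the words)
--     :returns: tag_set: a set of all tags
--             tag_count: the number of tags
--             tags: a dictionary of tags and their counts
--             tw_pair: a dictionary of (word, tag) pairs and their counts
--     """
--     tag_count = {}  # for the number of tags
--     num_of_tags = 0  # number of tags
--     tag_set = []  # for the order of tags
--     tw_pair = {}  # for the number of data
--
--     for sentence in train:
--         for word, tag in sentence:
--             if tag not in tag_count: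
--                 tag_set.append(tag)
--                 num_of_tags += 1
--                 tag_count[tag] = 1
--             else:
--                 tag_count[tag] += 1
--             if word not in tw_pair:
--                 tw_pair[word] = {tag: 1}
--             else:
--                 if tag not in tw_pair[word]:
--                     tw_pair[word][tag] = 1
--                 else:
--                     tw_pair[word][tag] += 1
--     return tag_set, tag_count, num_of_tags, tw_pair
-- ===== SOURCE B (Python) =====
-- def _uniq(xs):
--     return list(dict.fromkeys(xs))
--
--
-- def get_tw_pair(train):
--     pairs = [pair for sentence in train for pair in sentence]
--     tags = [tag for _, tag in pairs]
--     tag_set = _uniq(tags)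
--     tag_count = {t: tags.count(t) for t in tag_set}
--     tw_pair = {w: {t: pairs.count((w, t))
--                    for t in _uniq([t2 for w2, t2 in pairs if w2 == w])}
--                for w in _uniq([w for w, _ in pairs])}
--     return tag_set, tag_count, len(tag_set), tw_pair
-- ===== Notes on version B (the rewrite author's own statement) =====
-- stated objective: alternative
-- what changed: Replaces the single stateful loop that incrementally maintains four structures with membership tests per pair by a declarative decomposition: flatten once, then compute each output independently as an ordered dedup plus per-key count comprehensions.
import Mathlib
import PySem

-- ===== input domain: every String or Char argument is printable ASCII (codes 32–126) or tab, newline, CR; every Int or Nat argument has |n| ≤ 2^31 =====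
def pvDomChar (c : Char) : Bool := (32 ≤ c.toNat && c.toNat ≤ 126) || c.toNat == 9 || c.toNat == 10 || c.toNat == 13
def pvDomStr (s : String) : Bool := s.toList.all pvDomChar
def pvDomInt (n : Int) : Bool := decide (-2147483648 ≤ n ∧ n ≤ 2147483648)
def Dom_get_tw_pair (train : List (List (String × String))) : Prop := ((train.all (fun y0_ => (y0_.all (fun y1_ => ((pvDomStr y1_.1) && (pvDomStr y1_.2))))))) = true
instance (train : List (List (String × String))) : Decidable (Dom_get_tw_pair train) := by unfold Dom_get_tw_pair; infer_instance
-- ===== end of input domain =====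

-- B replaces A's single stateful loop (four structures updated with per-pair membership tests)
-- by a declarative decomposition: flatten once, then build each output from ordered dedups and counts.

-- ===== PORT A =====
-- loop body of A's 'for word, tag in sentence' (state: tag_set, tag_count, num_of_tags, tw_pair)
def get_tw_pair_step
    (st : List String × PySem.Dict String Int × Int × PySem.Dict String (PySem.Dict String Int))
    (p : String × String) :
    List String × PySem.Dict String Int × Int × PySem.Dict String (PySem.Dict String Int) :=
  let (tag_set, tag_count, num_of_tags, tw_pair) := st
  let (tag_set, tag_count, num_of_tags) :=
    if ¬ tag_count.contains p.2 then
      (tag_set ++ [p.2], tag_count.insert p.2 1, num_of_tags + 1)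
    else
      (tag_set, tag_count.insert p.2 (tag_count.getD p.2 0 + 1), num_of_tags)
  let tw_pair :=
    if ¬ tw_pair.contains p.1 then
      tw_pair.insert p.1 (PySem.Dict.mk [(p.2, 1)])
    else
      let inner := tw_pair.getD p.1 PySem.Dict.empty
      if ¬ inner.contains p.2 then
        tw_pair.insert p.1 (inner.insert p.2 1)
      else
        tw_pair.insert p.1 (inner.insert p.2 (inner.getD p.2 0 + 1))
  (tag_set, tag_count, num_of_tags, tw_pair)

def get_tw_pair (train : List (List (String × String))) : List String × (List (String × Int)) × Int × (List (String × List (String × Int))) :=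
  let fin := train.foldl (fun st sentence => sentence.foldl get_tw_pair_step st)
      ([], PySem.Dict.empty, 0, PySem.Dict.empty)
  (fin.1, fin.2.1.items, fin.2.2.1, fin.2.2.2.items.map (fun q => (q.1, q.2.items)))

-- ===== PORT B =====
def get_tw_pair_alt (train : List (List (String × String))) : List String × (List (String × Int)) × Int × (List (String × List (String × Int))) :=
  let pairs := train.foldl (fun acc sentence => acc ++ sentence) []
  let tags := pairs.map (fun q => q.2)
  let tag_set := PySem.List.dedup tags
  let tag_count := tag_set.map (fun t => (t, (PySem.List.count tags t : Int)))
  let tw_pair := (PySem.List.dedup (pairs.map (fun q => q.1))).map (fun w =>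
      (w, (PySem.List.dedup ((pairs.filter (fun q => q.1 == w)).map (fun q => q.2))).map
            (fun t => (t, (PySem.List.count pairs (w, t) : Int)))))
  (tag_set, tag_count, (tag_set.length : Int), tw_pair)

-- ===== PRECONDITION & SPEC =====
def Spec_get_tw_pair (train : List (List (String × String))) (out : List String × (List (String × Int)) × Int × (List (String × List (String × Int)))) : Prop := out = get_tw_pair_alt train
instance (train : List (List (String × String))) (out : List String × (List (String × Int)) × Int × (List (String × List (String × Int)))) : Decidable (Spec_get_tw_pair train out) := by unfold Spec_get_tw_pair; infer_instance

-- ===== CLAIM (what is proved, stated in full; the proofs are below) =====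
def Claim_equal_get_tw_pair : Prop := ∀ (train : List (List (String × String))), Dom_get_tw_pair train → Spec_get_tw_pair train (get_tw_pair train)

-- ===== LEMMAS AND PROOFS =====

-- B-shaped state derived from the flat pair stream
def pvTcD (tags : List String) : PySem.Dict String Int :=
  PySem.Dict.mk ((PySem.List.dedup tags).map (fun t => (t, (PySem.List.count tags t : Int))))

def pvInnerD (ps : List (String × String)) (w : String) : PySem.Dict String Int :=
  PySem.Dict.mk ((PySem.List.dedup ((ps.filter (fun q => q.1 == w)).map (fun q => q.2))).map
      (fun t => (t, (PySem.List.count ps (w, t) : Int))))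

def pvTwD (ps : List (String × String)) : PySem.Dict String (PySem.Dict String Int) :=
  PySem.Dict.mk ((PySem.List.dedup (ps.map (fun q => q.1))).map (fun w => (w, pvInnerD ps w)))

def pvDerive (ps : List (String × String)) :
    List String × PySem.Dict String Int × Int × PySem.Dict String (PySem.Dict String Int) :=
  (PySem.List.dedup (ps.map (fun q => q.2)), pvTcD (ps.map (fun q => q.2)),
   ((PySem.List.dedup (ps.map (fun q => q.2))).length : Int), pvTwD ps)

lemma pvFind {α β : Type} [BEq α] [LawfulBEq α] (ks : List α) (f : α → β) (x : α) (hx : x ∈ ks) :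
    (ks.map (fun k => (k, f k))).find? (fun q => q.1 == x) = some (x, f x) := by
  induction ks with
  | nil => cases hx
  | cons k ks ih =>
    by_cases h : k = x
    · subst h
      simp
    · have hx' : x ∈ ks := by
        rcases List.mem_cons.1 hx with h' | h'
        · exact absurd h'.symm h
        · exact h'
      simpa [List.find?_cons, h] using ih hx'

lemma pvContainsMk {α β : Type} [BEq α] [LawfulBEq α] (ks : List α) (f : α → β) (x : α) :
    (PySem.Dict.mk (ks.map (fun k => (k, f k)))).contains x = decide (x ∈ ks) := by
  simp [PySem.Dict.contains, List.any_map]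
  by_cases h : x ∈ ks
  · simpa [h] using ⟨x, h, rfl⟩
  · simp [h]
    intro a ha
    exact fun he => absurd (he ▸ ha) h

lemma pvGetDMk {α β : Type} [BEq α] [LawfulBEq α] (ks : List α) (f : α → β) (x : α) (d : β) (hx : x ∈ ks) :
    (PySem.Dict.mk (ks.map (fun k => (k, f k)))).getD x d = f x := by
  simp [PySem.Dict.getD, PySem.Dict.get?, pvFind ks f x hx]

lemma pvInsertMemMk {α β : Type} [BEq α] [LawfulBEq α] [DecidableEq α] (ks : List α) (f : α → β) (x : α) (v : β) (hx : x ∈ ks) :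
    (PySem.Dict.mk (ks.map (fun k => (k, f k)))).insert x v
      = PySem.Dict.mk (ks.map (fun k => if k = x then (x, v) else (k, f k))) := by
  rw [PySem.Dict.insert, pvContainsMk]
  simp only [hx, decide_true, if_true, List.map_map]
  congr 1
  apply List.map_congr_left
  intro k _
  by_cases h : k = x <;> simp [Function.comp, h]

lemma pvInsertNewMk {α β : Type} [BEq α] [LawfulBEq α] (ks : List α) (f : α → β) (x : α) (v : β) (hx : x ∉ ks) :
    (PySem.Dict.mk (ks.map (fun k => (k, f k)))).insert x v
      = PySem.Dict.mk (ks.map (fun k => (k, f k)) ++ [(x, v)]) := by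
  rw [PySem.Dict.insert, pvContainsMk]
  simp [hx]

lemma pvDedup_append_singleton {α : Type} [BEq α] [LawfulBEq α] (l : List α) (a : α) :
    PySem.List.dedup (l ++ [a]) = if a ∈ l then PySem.List.dedup l else PySem.List.dedup l ++ [a] := by
  have hm : (a ∈ List.foldl PySem.Set.add [] l) ↔ a ∈ l := PySem.Set.mem_ofList l a
  simp only [PySem.List.dedup, PySem.Set.ofList, List.foldl_append, List.foldl_cons, List.foldl_nil,
    PySem.Set.add, PySem.Set.contains]
  by_cases h : a ∈ l
  · simp [h, hm]
  · simp [h, hm]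

-- tag_count step
lemma pvTcStepOld (tags : List String) (t : String) (ht : t ∈ tags) :
    pvTcD (tags ++ [t]) = (pvTcD tags).insert t ((pvTcD tags).getD t 0 + 1) := by
  have hmem : t ∈ PySem.List.dedup tags := (PySem.List.mem_dedup tags t).2 ht
  rw [pvTcD, pvTcD, pvDedup_append_singleton, if_pos ht,
    pvGetDMk _ (fun x => (PySem.List.count tags x : Int)) t 0 hmem,
    pvInsertMemMk _ _ t _ hmem]
  congr 1
  apply List.map_congr_left
  intro x hx
  by_cases hxt : x = t
  · subst hxt
    simp [PySem.List.count, List.count_append]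
  · simp [hxt, PySem.List.count, List.count_append, List.count_cons, Ne.symm hxt]

lemma pvTcStepNew (tags : List String) (t : String) (ht : ¬ t ∈ tags) :
    pvTcD (tags ++ [t]) = (pvTcD tags).insert t 1 := by
  have hmem : ¬ t ∈ PySem.List.dedup tags := fun h => ht ((PySem.List.mem_dedup tags t).1 h)
  rw [pvTcD, pvTcD, pvDedup_append_singleton, if_neg ht, pvInsertNewMk _ _ t _ hmem]
  congr 1
  rw [List.map_append]
  congr 1
  · apply List.map_congr_left
    intro x hx
    have hxt : x ≠ t := fun he => hmem (he ▸ hx)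
    simp [PySem.List.count, List.count_append, List.count_cons, Ne.symm hxt]
  · have : ¬ List.Mem t tags := ht
    simp [PySem.List.count, List.count_append, List.count_eq_zero.2 ht]

lemma pvInnerUnchanged (ps : List (String × String)) (w t w' : String) (h : w' ≠ w) :
    pvInnerD (ps ++ [(w, t)]) w' = pvInnerD ps w' := by
  rw [pvInnerD, pvInnerD]
  have hf : (ps ++ [(w, t)]).filter (fun q => q.1 == w') = ps.filter (fun q => q.1 == w') := by
    rw [List.filter_append]
    simp [Ne.symm h]
  rw [hf]
  congr 1
  apply List.map_congr_left
  intro t' _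
  have : List.count (w', t') (ps ++ [(w, t)]) = List.count (w', t') ps := by
    simp [List.count_append, List.count_cons, Ne.symm h, Prod.ext_iff]
  simp [PySem.List.count, this]

lemma pvMemWtags (ps : List (String × String)) (w t : String)
    (h : (w, t) ∈ ps) : t ∈ (ps.filter (fun q => q.1 == w)).map (fun q => q.2) :=
  List.mem_map.2 ⟨(w, t), List.mem_filter.2 ⟨h, by simp⟩, rfl⟩

lemma pvTwStepNew (ps : List (String × String)) (w t : String)
    (hw : ¬ w ∈ ps.map (fun q => q.1)) :
    pvTwD (ps ++ [(w, t)]) = (pvTwD ps).insert w (PySem.Dict.mk [(t, 1)]) := by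
  have hmem : ¬ w ∈ PySem.List.dedup (ps.map (fun q => q.1)) :=
    fun h => hw ((PySem.List.mem_dedup _ w).1 h)
  rw [pvTwD, pvTwD, pvInsertNewMk _ _ w _ hmem]
  have hmf : (ps ++ [(w, t)]).map (fun q => q.1) = ps.map (fun q => q.1) ++ [w] := by simp
  rw [hmf, pvDedup_append_singleton, if_neg hw]
  congr 1
  rw [List.map_append]
  congr 1
  · apply List.map_congr_left
    intro w' hw'
    have h : w' ≠ w := fun he => hmem (he ▸ hw')
    rw [pvInnerUnchanged ps w t w' h]
  · -- the fresh word's inner dict is {t: 1}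
    have hfe : ps.filter (fun q => q.1 == w) = [] := by
      rw [List.filter_eq_nil_iff]
      intro q hq
      simp only [beq_iff_eq]
      exact fun he => hw (List.mem_map.2 ⟨q, hq, he⟩)
    have hcz : List.count (w, t) ps = 0 :=
      List.count_eq_zero.2 (fun h => hw (List.mem_map.2 ⟨(w, t), h, rfl⟩))
    simp [pvInnerD, List.filter_append, hfe, PySem.List.dedup, PySem.Set.ofList, PySem.Set.add,
      PySem.List.count, List.count_append, hcz]

lemma pvInnerStepNew (ps : List (String × String)) (w t : String)
    (htw : ¬ t ∈ (ps.filter (fun q => q.1 == w)).map (fun q => q.2)) :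
    pvInnerD (ps ++ [(w, t)]) w = (pvInnerD ps w).insert t 1 := by
  have hmemt : ¬ t ∈ PySem.List.dedup ((ps.filter (fun q => q.1 == w)).map (fun q => q.2)) :=
    fun h => htw ((PySem.List.mem_dedup _ t).1 h)
  rw [pvInnerD, pvInnerD, pvInsertNewMk _ _ t _ hmemt]
  have hfw : (ps ++ [(w, t)]).filter (fun q => q.1 == w) = ps.filter (fun q => q.1 == w) ++ [(w, t)] := by
    rw [List.filter_append]; simp
  rw [hfw]
  simp only [List.map_append, List.map_cons, List.map_nil]
  rw [pvDedup_append_singleton, if_neg htw]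
  have hcz : List.count (w, t) ps = 0 :=
    List.count_eq_zero.2 (fun h => htw (pvMemWtags ps w t h))
  have h1 : (PySem.List.dedup ((ps.filter (fun q => q.1 == w)).map (fun q => q.2))).map
        (fun t' => (t', (PySem.List.count (ps ++ [(w, t)]) (w, t') : Int)))
      = (PySem.List.dedup ((ps.filter (fun q => q.1 == w)).map (fun q => q.2))).map
        (fun t' => (t', (PySem.List.count ps (w, t') : Int))) := by
    apply List.map_congr_left
    intro t' ht'
    have hne : t' ≠ t := fun he => hmemt (he ▸ ht')
    simp [PySem.List.count, List.count_append, List.count_cons, Prod.ext_iff, Ne.symm hne]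
  have h2 : ([t].map (fun t' => (t', (PySem.List.count (ps ++ [(w, t)]) (w, t') : Int))))
      = [((t : String), (1 : Int))] := by
    simp [PySem.List.count, List.count_append, hcz]
  rw [List.map_append, h1, h2]

lemma pvInnerStepOld (ps : List (String × String)) (w t : String)
    (htw : t ∈ (ps.filter (fun q => q.1 == w)).map (fun q => q.2)) :
    pvInnerD (ps ++ [(w, t)]) w
      = (pvInnerD ps w).insert t ((pvInnerD ps w).getD t 0 + 1) := by
  have hmemt : t ∈ PySem.List.dedup ((ps.filter (fun q => q.1 == w)).map (fun q => q.2)) :=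
    (PySem.List.mem_dedup _ t).2 htw
  rw [pvInnerD, pvInnerD,
    pvGetDMk _ (fun t' => (PySem.List.count ps (w, t') : Int)) t 0 hmemt,
    pvInsertMemMk _ _ t _ hmemt]
  have hfw : (ps ++ [(w, t)]).filter (fun q => q.1 == w) = ps.filter (fun q => q.1 == w) ++ [(w, t)] := by
    rw [List.filter_append]; simp
  rw [hfw]
  simp only [List.map_append, List.map_cons, List.map_nil]
  rw [pvDedup_append_singleton, if_pos htw]
  congr 1
  apply List.map_congr_left
  intro t' ht'
  by_cases hne : t' = t
  · subst hne
    simp [PySem.List.count, List.count_append]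
  · simp [hne, PySem.List.count, List.count_append, List.count_cons, Prod.ext_iff, Ne.symm hne]

lemma pvTwStepOld (ps : List (String × String)) (w t : String)
    (hw : w ∈ ps.map (fun q => q.1)) (inner' : PySem.Dict String Int)
    (hinner : pvInnerD (ps ++ [(w, t)]) w = inner') :
    pvTwD (ps ++ [(w, t)]) = (pvTwD ps).insert w inner' := by
  have hmem : w ∈ PySem.List.dedup (ps.map (fun q => q.1)) := (PySem.List.mem_dedup _ w).2 hw
  rw [pvTwD, pvTwD, pvInsertMemMk _ _ w _ hmem]
  have hmf : (ps ++ [(w, t)]).map (fun q => q.1) = ps.map (fun q => q.1) ++ [w] := by simp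
  rw [hmf, pvDedup_append_singleton, if_pos hw]
  congr 1
  apply List.map_congr_left
  intro w' hw'
  by_cases h : w = w'
  · subst h
    simp [hinner]
  · simp only [if_neg (Ne.symm h)]
    rw [pvInnerUnchanged ps w t w' (Ne.symm h)]

lemma pvContainsTc (tags : List String) (t : String) :
    (pvTcD tags).contains t = decide (t ∈ tags) := by
  rw [pvTcD, pvContainsMk]
  by_cases h : t ∈ tags
  · simp [h, (PySem.List.mem_dedup tags t).2 h]
  · simp [h, fun hh => h ((PySem.List.mem_dedup tags t).1 hh)]

lemma pvContainsTw (ps : List (String × String)) (w : String) :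
    (pvTwD ps).contains w = decide (w ∈ ps.map (fun q => q.1)) := by
  rw [pvTwD, pvContainsMk]
  by_cases h : w ∈ ps.map (fun q => q.1)
  · simp [h, (PySem.List.mem_dedup _ w).2 h]
  · simp [h, fun hh => h ((PySem.List.mem_dedup _ w).1 hh)]

lemma pvContainsInner (ps : List (String × String)) (w t : String) :
    (pvInnerD ps w).contains t = decide (t ∈ (ps.filter (fun q => q.1 == w)).map (fun q => q.2)) := by
  rw [pvInnerD, pvContainsMk]
  by_cases h : t ∈ (ps.filter (fun q => q.1 == w)).map (fun q => q.2)
  · simp [h, (PySem.List.mem_dedup _ t).2 h]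
  · simp [h, fun hh => h ((PySem.List.mem_dedup _ t).1 hh)]

lemma pvGetDTw (ps : List (String × String)) (w : String) (hw : w ∈ ps.map (fun q => q.1)) :
    (pvTwD ps).getD w PySem.Dict.empty = pvInnerD ps w := by
  rw [pvTwD]
  exact pvGetDMk _ (fun w' => pvInnerD ps w') w _ ((PySem.List.mem_dedup _ w).2 hw)

lemma pvStep (ps : List (String × String)) (p : String × String) :
    pvDerive (ps ++ [p]) = get_tw_pair_step (pvDerive ps) p := by
  obtain ⟨w, t⟩ := p
  have hmapsnd : (ps ++ [(w, t)]).map (fun q : String × String => q.2)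
      = ps.map (fun q => q.2) ++ [t] := by simp
  simp only [pvDerive, get_tw_pair_step, pvContainsTc, pvContainsTw]
  rw [hmapsnd]
  by_cases ht : t ∈ ps.map (fun q : String × String => q.2) <;>
    by_cases hw : w ∈ ps.map (fun q : String × String => q.1)
  · -- old tag, old word
    simp only [ht, hw, decide_true, not_true_eq_false, if_false, if_neg]
    rw [pvGetDTw ps w hw, pvContainsInner]
    by_cases htw : t ∈ (ps.filter (fun q => q.1 == w)).map (fun q => q.2)
    · simp only [htw, decide_true, not_true_eq_false, if_false,
        pvDedup_append_singleton, if_pos ht, pvTcStepOld _ _ ht,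
        pvTwStepOld ps w t hw _ (pvInnerStepOld ps w t htw)]
    · simp only [htw, decide_false, not_false_eq_true, if_true,
        pvDedup_append_singleton, if_pos ht, pvTcStepOld _ _ ht,
        pvTwStepOld ps w t hw _ (pvInnerStepNew ps w t htw)]
      simp
  · -- old tag, new word
    simp only [ht, hw, decide_true, decide_false, not_true_eq_false, not_false_eq_true,
      if_false, if_true, pvDedup_append_singleton, if_pos ht, pvTcStepOld _ _ ht,
      pvTwStepNew ps w t hw]
    simp
  · -- new tag, old word
    simp only [ht, hw, decide_true, decide_false, not_true_eq_false, not_false_eq_true,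
      if_false, if_true]
    rw [pvGetDTw ps w hw, pvContainsInner]
    have htw : ¬ t ∈ (ps.filter (fun q => q.1 == w)).map (fun q => q.2) := by
      intro hh
      rcases List.mem_map.1 hh with ⟨q, hq, hq2⟩
      exact ht (List.mem_map.2 ⟨q, (List.mem_filter.1 hq).1, hq2⟩)
    simp only [htw, decide_false, not_false_eq_true, if_true,
      pvDedup_append_singleton, if_neg ht, pvTcStepNew _ _ ht,
      pvTwStepOld ps w t hw _ (pvInnerStepNew ps w t htw)]
    simp
  · -- new tag, new word
    simp only [ht, hw, decide_false, not_false_eq_true, if_true,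
      pvDedup_append_singleton, if_neg ht, pvTcStepNew _ _ ht, pvTwStepNew ps w t hw]
    simp

lemma pvFold (ps : List (String × String)) :
    ps.foldl get_tw_pair_step ([], PySem.Dict.empty, 0, PySem.Dict.empty) = pvDerive ps := by
  induction ps using List.reverseRecOn with
  | nil => rfl
  | append_singleton l p ih => rw [List.foldl_append, ih, List.foldl_cons, List.foldl_nil, pvStep]

lemma pvNested (train : List (List (String × String)))
    (st : List String × PySem.Dict String Int × Int × PySem.Dict String (PySem.Dict String Int))
    (acc : List (String × String)) (h : acc.foldl get_tw_pair_step ([], PySem.Dict.empty, 0, PySem.Dict.empty) = st) :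
    train.foldl (fun st sentence => sentence.foldl get_tw_pair_step st) st
      = (train.foldl (fun a s => a ++ s) acc).foldl get_tw_pair_step ([], PySem.Dict.empty, 0, PySem.Dict.empty) := by
  induction train generalizing st acc with
  | nil => simp [h]
  | cons s rest ih =>
      simp only [List.foldl_cons]
      exact ih _ (acc ++ s) (by rw [List.foldl_append, h])

-- ===== VERDICT (by name: the statement is the Claim_ definition above) =====
theorem get_tw_pair_spec : Claim_equal_get_tw_pair := by
  intro train _
  unfold Spec_get_tw_pair
  simp only [get_tw_pair, get_tw_pair_alt]
  rw [pvNested train ([], PySem.Dict.empty, 0, PySem.Dict.empty) [] rfl, pvFold]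
  simp [pvDerive, pvTcD, pvTwD, pvInnerD, List.map_map, Function.comp]
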